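-- pv_equiv track=rewrite | github.com/Judongsung/algorithm | 백준/Gold/2110. 공유기 설치/공유기 설치.py | find_max_nearest
-- ===== SOURCE A (Python) =====
-- def is_possible(distances, router, min_dist) -> bool:
--     count = 1
--     cur = 0
--     for d in distances:
--         cur += d
--         if cur >= min_dist:
--             count += 1
--             if count >= router:
--                 return True
--             cur = 0
--     return False
--
-- def find_max_nearest(pos: list, router: int) -> int:
--     distances = []
--     sorted_pos = sorted(pos)
--     for i in range(len(sorted_pos)-1):
--         dist = sorted_pos[i+1]-sorted_pos[i]
--         distances.append(dist)
--
--     left, right = 0, max(pos)-min(pos)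
--     while left < right:
--         mid = (left+right+1)//2
--         if is_possible(distances, router, mid):
--             left = mid
--         else:
--             right = mid-1
--
--     return left
-- ===== SOURCE B (Python) =====
-- def can_place(sp, router, min_dist):
--     count = 1
--     last = sp[0]
--     for p in sp[1:]:
--         if p - last >= min_dist:
--             count += 1
--             if count >= router:
--                 return True
--             last = p
--     return False
--
-- def find_max_nearest(pos: list, router: int) -> int:
--     sp = sorted(pos)
--     cands = sorted({b - a for a in sp for b in sp if a < b}, reverse=True)
--     for c in cands:
--         if can_place(sp, router, c):
--             return c
--     return 0
-- ===== Notes on version B (the rewrite author's own statement) =====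
-- stated objective: alternative
-- what changed: Replaced A's binary search over the integer value range [0, max-min] by a descending scan over the finite set of candidate answers (the distinct pairwise position differences), using the fact that the optimal minimal spacing is always such a difference; the feasibility check walks the sorted positions with a last-placed anchor instead of A's precomputed gap array with a running sum.
import Mathlib
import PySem

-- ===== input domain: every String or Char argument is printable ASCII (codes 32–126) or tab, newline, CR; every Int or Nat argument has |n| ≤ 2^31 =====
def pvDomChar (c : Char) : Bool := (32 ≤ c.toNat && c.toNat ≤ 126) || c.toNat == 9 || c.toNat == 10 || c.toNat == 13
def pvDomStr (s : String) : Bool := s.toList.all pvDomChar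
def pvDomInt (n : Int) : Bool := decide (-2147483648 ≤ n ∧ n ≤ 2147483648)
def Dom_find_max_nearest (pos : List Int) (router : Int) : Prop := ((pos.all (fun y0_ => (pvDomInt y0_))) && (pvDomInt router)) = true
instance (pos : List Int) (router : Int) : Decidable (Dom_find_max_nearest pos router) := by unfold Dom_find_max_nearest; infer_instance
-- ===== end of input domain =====

-- ===== PORT A =====
-- B replaces A's binary search over the value range [0, max-min] by a descending
-- scan over the finite set of candidate answers (the distinct pairwise position
-- differences); the optimum is always such a difference. Objective: alternative.

-- loop of is_possible: for d in distances with state (count, cur)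
def ipLoop (router min_dist : Int) : List Int → Int → Int → Bool
  | [], _, _ => false
  | d :: ds, count, cur =>
    let cur' := cur + d
    if cur' ≥ min_dist then
      let count' := count + 1
      if count' ≥ router then true
      else ipLoop router min_dist ds count' 0
    else ipLoop router min_dist ds count cur'

def is_possible (distances : List Int) (router min_dist : Int) : Bool :=
  ipLoop router min_dist distances 1 0

-- the while-loop of A's binary search (termination: the interval shrinks)
def bsearchA (distances : List Int) (router left right : Int) : Int :=
  if h : left < right then
    let mid := PySem.Int.floordiv (left + right + 1) 2
    if is_possible distances router mid then bsearchA distances router mid right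
    else bsearchA distances router left (mid - 1)
  else left
termination_by (right - left).toNat
decreasing_by
  · have hb := PySem.Int.floordiv_two_mid_bounds (lo := left + 1) (hi := right) (by omega)
    rw [show left + 1 + right = left + right + 1 by ring] at hb
    omega
  · have hb := PySem.Int.floordiv_two_mid_bounds (lo := left + 1) (hi := right) (by omega)
    rw [show left + 1 + right = left + right + 1 by ring] at hb
    omega

def find_max_nearest (pos : List Int) (router : Int) : Int :=
  let sorted_pos := PySem.List.sorted pos (fun x => x) false
  let distances := (PySem.List.pyRange 0 (PySem.List.len sorted_pos - 1) 1).foldl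
    (fun acc i => acc ++ [PySem.List.pyGetD sorted_pos (i + 1) 0 - PySem.List.pyGetD sorted_pos i 0]) []
  let left : Int := 0
  let right := (PySem.List.max? pos (fun x => x)).getD 0 - (PySem.List.min? pos (fun x => x)).getD 0
  bsearchA distances router left right

-- ===== PORT B =====
-- loop of can_place: for p in sp[1:] with state (count, last)
def cpLoop (router min_dist : Int) : List Int → Int → Int → Bool
  | [], _, _ => false
  | p :: ps, count, last =>
    if p - last ≥ min_dist then
      let count' := count + 1
      if count' ≥ router then true
      else cpLoop router min_dist ps count' p
    else cpLoop router min_dist ps count last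

-- sp[0] is ported total (pyGetD … 0): B only calls can_place with nonempty sp
def can_place (sp : List Int) (router min_dist : Int) : Bool :=
  cpLoop router min_dist (PySem.List.slice sp (some 1) none) 1
    (PySem.List.pyGetD sp 0 0)

-- the for-loop with early return over the candidate list
def candScan (sp : List Int) (router : Int) : List Int → Int
  | [] => 0
  | c :: cs => if can_place sp router c then c else candScan sp router cs

def find_max_nearest_alt (pos : List Int) (router : Int) : Int :=
  let sp := PySem.List.sorted pos (fun x => x) false
  let cands := PySem.List.sorted
    (PySem.Set.ofList (sp.flatMap (fun a => (sp.filter (fun b => a < b)).map (fun b => b - a))))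
    (fun x => x) true
  candScan sp router cands

-- ===== PRECONDITION & SPEC =====
-- Pre_ excludes only the empty list, on which Python's max(pos) raises ValueError.
def Pre_find_max_nearest (pos : List Int) (router : Int) : Prop := pos ≠ []
instance (pos : List Int) (router : Int) : Decidable (Pre_find_max_nearest pos router) := by
  unfold Pre_find_max_nearest; infer_instance

def pvWitness_find_max_nearest : List Int × Int := ([1, 2, 8, 4, 9], 3)

def Spec_find_max_nearest (pos : List Int) (router : Int) (out : Int) : Prop := out = find_max_nearest_alt pos router
instance (pos : List Int) (router : Int) (out : Int) : Decidable (Spec_find_max_nearest pos router out) := by unfold Spec_find_max_nearest; infer_instance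

-- ===== CLAIM (what is proved, stated in full; the proofs are below) =====
def Claim_equal_find_max_nearest : Prop := ∀ (pos : List Int) (router : Int), Dom_find_max_nearest pos router → Pre_find_max_nearest pos router → Spec_find_max_nearest pos router (find_max_nearest pos router)

-- ===== LEMMAS AND PROOFS =====

-- the list of consecutive gaps of a list (proof-side characterisation of A's `distances`)
def gaps : List Int → List Int
  | a :: b :: rest => (b - a) :: gaps (b :: rest)
  | _ => []

lemma gaps_eq_range_map : ∀ (l : List Int),
    (List.range (l.length - 1)).map (fun k => l.getD (k + 1) 0 - l.getD k 0) = gaps l := by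
  intro l
  induction l with
  | nil => simp [gaps]
  | cons a rest ih =>
    cases rest with
    | nil => simp [gaps]
    | cons b rest2 =>
      have hl : (a :: b :: rest2).length - 1 = ((b :: rest2).length - 1) + 1 := by simp
      rw [hl, List.range_succ_eq_map, List.map_cons, List.map_map]
      show _ :: _ = (b - a) :: gaps (b :: rest2)
      rw [← ih]
      congr 1

lemma distances_eq_gaps (l : List Int) :
    (PySem.List.pyRange 0 (PySem.List.len l - 1) 1).foldl
      (fun acc i => acc ++ [PySem.List.pyGetD l (i + 1) 0 - PySem.List.pyGetD l i 0]) []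
      = gaps l := by
  rw [PySem.List.foldl_append_singleton_eq_map, List.nil_append,
    PySem.List.pyRange_one, List.map_map]
  have hlen : ((PySem.List.len l - 1) - 0).toNat = l.length - 1 := by
    simp [PySem.List.len_eq]
  rw [hlen, ← gaps_eq_range_map l]
  apply List.map_congr_left
  intro k _
  have h1 : ((k : Int) + 1) = ((k + 1 : Nat) : Int) := by push_cast; ring
  simp only [Function.comp, zero_add, h1, PySem.List.pyGetD_natCast, List.getD_eq_getElem?_getD]

-- A's running sum `cur` is exactly the distance from the last placed router
lemma ipLoop_gaps_eq_cpLoop (router min_dist : Int) : ∀ (ps : List Int) (prev last count : Int),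
    ipLoop router min_dist (gaps (prev :: ps)) count (prev - last)
      = cpLoop router min_dist ps count last := by
  intro ps
  induction ps with
  | nil => intro prev last count; simp [gaps, ipLoop, cpLoop]
  | cons p rest ih =>
    intro prev last count
    show ipLoop router min_dist ((p - prev) :: gaps (p :: rest)) count (prev - last) = _
    rw [ipLoop, cpLoop]
    have hcur : prev - last + (p - prev) = p - last := by ring
    simp only [hcur]
    split_ifs with h1 h2
    · rfl
    · rw [show (0 : Int) = p - p by ring, ih]
    · rw [ih]

lemma is_possible_eq_can_place (h : Int) (t : List Int) (router min_dist : Int) :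
    is_possible (gaps (h :: t)) router min_dist = can_place (h :: t) router min_dist := by
  rw [is_possible, can_place, PySem.List.slice_from_one, List.tail_cons,
    PySem.List.pyGetD_zero_cons]
  rw [show (0 : Int) = h - h by ring, ipLoop_gaps_eq_cpLoop]

-- greedy placement count from anchor `last` at spacing `d`
def gcount (d last : Int) : List Int → Nat
  | [] => 0
  | p :: ps => if p - last ≥ d then gcount d p ps + 1 else gcount d last ps

-- `chainGE d last c`: consecutive elements of `last :: c` are at least `d` apart
def chainGE (d : Int) : Int → List Int → Prop
  | _, [] => True
  | last, p :: ps => last + d ≤ p ∧ chainGE d p ps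

-- the feasibility loop succeeds iff the greedy count is large enough
lemma cpLoop_eq_gcount (router d : Int) : ∀ (ps : List Int) (count last : Int),
    cpLoop router d ps count last
      = decide (router ≤ count + (gcount d last ps : Int) ∧ 1 ≤ gcount d last ps) := by
  intro ps
  induction ps with
  | nil => intro count last; simp [cpLoop, gcount]
  | cons p rest ih =>
    intro count last
    by_cases h1 : p - last ≥ d
    · by_cases h2 : count + 1 ≥ router
      · simp only [cpLoop, gcount, if_pos h1, ge_iff_le, if_pos h2]
        rw [eq_comm, decide_eq_true_iff]
        constructor
        · push_cast; omega
        · omega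
      · simp only [cpLoop, gcount, if_pos h1, ge_iff_le, if_neg h2]
        rw [ih]
        rw [decide_eq_decide]
        constructor
        · rintro ⟨ha, hb⟩
          refine ⟨by push_cast; omega, by omega⟩
        · rintro ⟨ha, hb⟩
          push_cast at ha
          refine ⟨by omega, by omega⟩
    · simp only [cpLoop, gcount, if_neg h1]
      exact ih count last

lemma can_place_eq_gcount (h : Int) (t : List Int) (router d : Int) :
    can_place (h :: t) router d
      = decide (router ≤ 1 + (gcount d h t : Int) ∧ 1 ≤ gcount d h t) := by
  rw [can_place, PySem.List.slice_from_one, List.tail_cons, PySem.List.pyGetD_zero_cons,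
    cpLoop_eq_gcount]

-- the greedy placements form a valid chain of the greedy length
lemma gcount_chain (d : Int) : ∀ (t : List Int) (last : Int),
    ∃ c : List Int, c.Sublist t ∧ chainGE d last c ∧ c.length = gcount d last t := by
  intro t
  induction t with
  | nil => intro last; exact ⟨[], by simp, trivial, by simp [gcount]⟩
  | cons p ps ih =>
    intro last
    by_cases h : p - last ≥ d
    · obtain ⟨c, hs, hc, hl⟩ := ih p
      exact ⟨p :: c, List.Sublist.cons₂ p hs, ⟨by omega, hc⟩,
        by simp [gcount, if_pos h, hl]⟩
    · obtain ⟨c, hs, hc, hl⟩ := ih last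
      exact ⟨c, List.Sublist.cons p hs, hc, by simp [gcount, if_neg h, hl]⟩

-- a chain's anchor may move left
lemma chainGE_anchor_mono {d x y : Int} {c : List Int} (hxy : x ≤ y)
    (hc : chainGE d y c) : chainGE d x c := by
  cases c with
  | nil => trivial
  | cons q c' => exact ⟨by have := hc.1; omega, hc.2⟩

-- a chain for a larger spacing is a chain for a smaller one
lemma chainGE_mono {d d' : Int} (hdd : d ≤ d') : ∀ {last : Int} {c : List Int},
    chainGE d' last c → chainGE d last c := by
  intro last c
  induction c generalizing last with
  | nil => intro _; trivial
  | cons q c' ih => intro hc; exact ⟨by have := hc.1; omega, ih hc.2⟩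

-- greedy optimality: no valid chain in a sorted list beats the greedy count
lemma gcount_ge_chain (d : Int) : ∀ (t : List Int), t.Pairwise (· ≤ ·) →
    ∀ (last : Int) (c : List Int), c.Sublist t →
      chainGE d last c → c.length ≤ gcount d last t := by
  intro t
  induction t with
  | nil => intro _ last c hs _; simp [List.sublist_nil.mp hs, gcount]
  | cons p ps ih =>
    intro hsort last c hs hc
    have hsort' : ps.Pairwise (· ≤ ·) := hsort.tail
    cases c with
    | nil => simp
    | cons q c' =>
      cases hs with
      | cons _ hs' =>
        -- q :: c' entirely inside ps (p skipped)
        have hpq : p ≤ q := (List.pairwise_cons.mp hsort).1 q (hs'.subset (by simp))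
        rw [gcount]
        split_ifs with h
        · -- greedy places p; c' is a chain from q, hence from p
          have hc' : chainGE d p c' := chainGE_anchor_mono hpq hc.2
          have hsub : c'.Sublist ps := (List.sublist_cons_self q c').trans hs'
          have := ih hsort' p c' hsub hc'
          simp only [List.length_cons]
          omega
        · exact ih hsort' last (q :: c') hs' hc
      | cons₂ _ hs' =>
        -- q = p is taken
        rw [gcount, if_pos (by have := hc.1; omega)]
        have := ih hsort' p c' hs' hc.2
        simp only [List.length_cons]
        omega

-- greedy count is antitone in the spacing (on a sorted list)
lemma gcount_antitone {d d' : Int} (hdd : d ≤ d') (t : List Int)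
    (hsort : t.Pairwise (· ≤ ·)) (last : Int) :
    gcount d' last t ≤ gcount d last t := by
  obtain ⟨c, hs, hc, hl⟩ := gcount_chain d' t last
  have := gcount_ge_chain d t hsort last c hs (chainGE_mono hdd hc)
  omega

-- feasibility is antitone in the spacing
lemma can_place_antitone (h : Int) (t : List Int) (hsort : t.Pairwise (· ≤ ·))
    (router : Int) {a b : Int} (hab : a ≤ b)
    (hb : can_place (h :: t) router b = true) : can_place (h :: t) router a = true := by
  rw [can_place_eq_gcount] at hb ⊢
  rw [decide_eq_true_iff] at hb ⊢
  have := gcount_antitone hab t hsort h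
  omega

-- a chain contains a pairwise gap m ≥ d along which it is still a chain
lemma chain_min_gap (d : Int) : ∀ (c : List Int) (h : Int), c ≠ [] →
    chainGE d h c →
    ∃ m, d ≤ m ∧ chainGE m h c ∧ ∃ x ∈ h :: c, x + m ∈ h :: c := by
  intro c
  induction c with
  | nil => intro h hne; exact absurd rfl hne
  | cons q c' ih =>
    intro h _ hc
    cases c' with
    | nil =>
      exact ⟨q - h, by have := hc.1; omega, ⟨by omega, trivial⟩,
        ⟨h, by simp, by simp [show h + (q - h) = q by ring]⟩⟩
    | cons r c'' =>
      obtain ⟨m', hm'd, hm'c, x, hx, hxm⟩ := ih q (by simp) hc.2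
      by_cases hmin : q - h ≤ m'
      · exact ⟨q - h, by have := hc.1; omega,
          ⟨by omega, chainGE_mono hmin hm'c⟩,
          ⟨h, by simp, by simp [show h + (q - h) = q by ring]⟩⟩
      · refine ⟨m', hm'd, ⟨by have := hc.1; omega, hm'c⟩, x, ?_, ?_⟩
        · rcases List.mem_cons.mp hx with hx | hx
          · simp [hx]
          · simp [hx]
        · rcases List.mem_cons.mp hxm with hxm | hxm
          · simp [hxm]
          · simp [hxm]

-- candidate completeness: any feasible spacing d ≥ 1 is dominated by a feasible pairwise gap
lemma feasible_candidate (h : Int) (t : List Int) (hsort : t.Pairwise (· ≤ ·))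
    (router d : Int) (hd : 1 ≤ d) (hfeas : can_place (h :: t) router d = true) :
    ∃ m, d ≤ m ∧ can_place (h :: t) router m = true ∧
      ∃ x ∈ h :: t, x + m ∈ h :: t := by
  rw [can_place_eq_gcount, decide_eq_true_iff] at hfeas
  obtain ⟨c, hs, hc, hl⟩ := gcount_chain d t h
  have hcne : c ≠ [] := by
    intro he; rw [he] at hl; simp at hl; omega
  obtain ⟨m, hdm, hmc, x, hx, hxm⟩ := chain_min_gap d c h hcne hc
  have hopt := gcount_ge_chain m t hsort h c hs hmc
  refine ⟨m, hdm, ?_, x, ?_, ?_⟩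
  · rw [can_place_eq_gcount, decide_eq_true_iff]
    constructor
    · omega
    · omega
  · rcases List.mem_cons.mp hx with hx | hx
    · simp [hx]
    · exact List.mem_cons_of_mem h (hs.subset hx)
  · rcases List.mem_cons.mp hxm with hxm | hxm
    · simp [hxm]
    · exact List.mem_cons_of_mem h (hs.subset hxm)

-- characterisation of A's binary search under an antitone check
lemma bsearchA_char (dists : List Int) (router : Int)
    (hmono : ∀ a b : Int, a ≤ b → is_possible dists router b = true →
      is_possible dists router a = true) :
    ∀ (n : Nat) (left right : Int), (right - left).toNat = n → left ≤ right →
      left ≤ bsearchA dists router left right ∧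
      bsearchA dists router left right ≤ right ∧
      (bsearchA dists router left right = left ∨
        is_possible dists router (bsearchA dists router left right) = true) ∧
      (∀ e, bsearchA dists router left right < e → e ≤ right →
        is_possible dists router e = false) := by
  intro n
  induction n using Nat.strong_induction_on with
  | _ n ih =>
    intro left right hn hle
    rw [bsearchA]
    by_cases hlt : left < right
    · simp only [dif_pos hlt]
      have hb := PySem.Int.floordiv_two_mid_bounds (lo := left + 1) (hi := right) (by omega)
      rw [show left + 1 + right = left + right + 1 by ring] at hb
      set mid := PySem.Int.floordiv (left + right + 1) 2 with hmid
      split_ifs with hcp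
      · obtain ⟨h1, h2, h3, h4⟩ := ih ((right - mid).toNat) (by omega) mid right rfl (by omega)
        refine ⟨by omega, h2, ?_, h4⟩
        rcases h3 with h3 | h3
        · exact Or.inr (by rw [h3]; exact hcp)
        · exact Or.inr h3
      · obtain ⟨h1, h2, h3, h4⟩ := ih ((mid - 1 - left).toNat) (by omega) left (mid - 1) rfl (by omega)
        refine ⟨h1, by omega, h3, ?_⟩
        intro e he1 he2
        by_cases hem : e ≤ mid - 1
        · exact h4 e he1 hem
        · rcases Bool.eq_false_or_eq_true (is_possible dists router e) with hf | ht
          · exact absurd (hmono mid e (by omega) hf) (by simp [hcp])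
          · exact ht
    · simp only [dif_neg hlt]
      refine ⟨le_refl _, hle, by first | exact Or.inl rfl | exact Or.inl trivial, fun e he1 he2 => by omega⟩

-- characterisation of B's descending scan
lemma candScan_char (sp : List Int) (router : Int) : ∀ (cl : List Int),
    cl.Pairwise (fun a b => b ≤ a) →
    (candScan sp router cl = 0 ∧ ∀ c ∈ cl, can_place sp router c = false) ∨
    (candScan sp router cl ∈ cl ∧ can_place sp router (candScan sp router cl) = true ∧
      ∀ c ∈ cl, candScan sp router cl < c → can_place sp router c = false) := by
  intro cl
  induction cl with
  | nil => intro _; exact Or.inl ⟨rfl, by simp⟩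
  | cons c cs ih =>
    intro hsort
    rw [candScan]
    split_ifs with hcp
    · refine Or.inr ⟨by simp, hcp, ?_⟩
      intro c' hc' hlt
      rcases List.mem_cons.mp hc' with hc' | hc'
      · omega
      · have := (List.pairwise_cons.mp hsort).1 c' hc'
        omega
    · rcases ih hsort.tail with ⟨h0, hall⟩ | ⟨hmem, hfeas, hall⟩
      · refine Or.inl ⟨h0, ?_⟩
        intro c' hc'
        rcases List.mem_cons.mp hc' with hc' | hc'
        · simpa [hc'] using hcp
        · exact hall c' hc'
      · refine Or.inr ⟨List.mem_cons_of_mem c hmem, hfeas, ?_⟩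
        intro c' hc' hlt
        rcases List.mem_cons.mp hc' with hc' | hc'
        · simpa [hc'] using hcp
        · exact hall c' hc' hlt

-- ===== VERDICT (by name: the statement is the Claim_ definition above) =====
theorem find_max_nearest_spec : Claim_equal_find_max_nearest := by
  intro pos router _ hpre
  unfold Spec_find_max_nearest
  simp only [find_max_nearest, find_max_nearest_alt]
  -- name the shared data
  set sp := PySem.List.sorted pos (fun x => x) false with hsp
  have hsne : sp ≠ [] := by
    rw [hsp, Ne, PySem.List.sorted_eq_nil_iff]; exact hpre
  obtain ⟨h, t, hst⟩ := List.exists_cons_of_ne_nil hsne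
  have hsort : sp.Pairwise (· ≤ ·) := PySem.List.sorted_pairwise pos (fun x => x)
  have htsort : t.Pairwise (· ≤ ·) := by
    have := hst ▸ hsort; exact this.tail
  -- the bounds of the search interval
  obtain ⟨M, hM⟩ := Option.ne_none_iff_exists'.mp
    (by rw [Ne, PySem.List.max?_eq_none_iff]; exact hpre :
      PySem.List.max? pos (fun x => x) ≠ none)
  obtain ⟨mn, hmn⟩ := Option.ne_none_iff_exists'.mp
    (by rw [Ne, PySem.List.min?_eq_none_iff]; exact hpre :
      PySem.List.min? pos (fun x => x) ≠ none)
  have hMmax : ∀ y ∈ pos, y ≤ M := fun y hy => PySem.List.max?_isMax hM y hy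
  have hmnmin : ∀ y ∈ pos, mn ≤ y := fun y hy => PySem.List.min?_isMin hmn y hy
  have hR0 : (0 : Int) ≤ M - mn := by
    obtain ⟨z, hz⟩ := List.exists_mem_of_ne_nil pos hpre
    have := hMmax z hz; have := hmnmin z hz; omega
  rw [hM, hmn, distances_eq_gaps]
  simp only [Option.getD_some]
  set R := M - mn with hRdef
  -- feasibility predicate transfer A → B
  have hisp : ∀ d, is_possible (gaps sp) router d = can_place sp router d := by
    intro d; rw [hst]; exact is_possible_eq_can_place h t router d
  -- membership in sp is membership in pos, bounded by [mn, M]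
  have hmem_sp : ∀ y ∈ sp, y ∈ pos := fun y hy =>
    (PySem.List.mem_sorted pos (fun x => x) false y).mp (hsp ▸ hy)
  -- the candidate list
  set L := sp.flatMap (fun a => (sp.filter (fun b => a < b)).map (fun b => b - a)) with hL
  set cl := PySem.List.sorted (PySem.Set.ofList L) (fun x => x) true with hcl
  have hclmem : ∀ c, c ∈ cl ↔ c ∈ L := by
    intro c
    rw [hcl, PySem.List.mem_sorted _ _ _ c, PySem.Set.mem_ofList]
  have hLmem : ∀ c, c ∈ L ↔ ∃ a ∈ sp, ∃ b ∈ sp, a < b ∧ c = b - a := by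
    intro c
    rw [hL, List.mem_flatMap]
    constructor
    · rintro ⟨a, ha, hc⟩
      obtain ⟨b, hb, hba⟩ := List.mem_map.mp hc
      obtain ⟨hbsp, hab⟩ := List.mem_filter.mp hb
      exact ⟨a, ha, b, hbsp, by simpa using hab, hba.symm⟩
    · rintro ⟨a, ha, b, hb, hab, hc⟩
      exact ⟨a, ha, List.mem_map.mpr ⟨b, List.mem_filter.mpr ⟨hb, by simpa using hab⟩, hc.symm⟩⟩
  have hclbound : ∀ c ∈ cl, 1 ≤ c ∧ c ≤ R := by
    intro c hc
    obtain ⟨a, ha, b, hb, hab, hcb⟩ := (hLmem c).mp ((hclmem c).mp hc)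
    have h1 := hmnmin a (hmem_sp a ha)
    have h2 := hMmax b (hmem_sp b hb)
    omega
  have hclsort : cl.Pairwise (fun a b => b ≤ a) := by
    have := PySem.List.sorted_pairwise_rev (PySem.Set.ofList L) (fun x => x)
    exact this
  -- the two characterisations
  have hmono : ∀ a b : Int, a ≤ b → is_possible (gaps sp) router b = true →
      is_possible (gaps sp) router a = true := by
    intro a b hab hfb
    rw [hisp] at hfb ⊢
    rw [hst] at hfb ⊢
    exact can_place_antitone h t htsort router hab hfb
  obtain ⟨hA1, hA2, hA3, hA4⟩ :=
    bsearchA_char (gaps sp) router hmono ((R - 0).toNat) 0 R rfl hR0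
  set rA := bsearchA (gaps sp) router 0 R with hrA
  -- any feasible spacing ≥ 1 is dominated by a feasible candidate
  have hcand : ∀ e : Int, 1 ≤ e → can_place sp router e = true →
      ∃ m ∈ cl, e ≤ m ∧ can_place sp router m = true := by
    intro e he hfe
    have hfeas : can_place (h :: t) router e = true := by rw [← hst]; exact hfe
    obtain ⟨m, hem, hmf, x, hx, hxm⟩ := feasible_candidate h t htsort router e he hfeas
    refine ⟨m, (hclmem m).mpr ((hLmem m).mpr
      ⟨x, hst ▸ hx, x + m, hst ▸ hxm, by omega, by ring⟩), hem, by rw [hst]; exact hmf⟩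
  -- B's result satisfies the same characterisation; conclude by uniqueness
  rcases candScan_char sp router cl hclsort with ⟨h0, hall⟩ | ⟨hmem, hfeas, hall⟩
  · -- no candidate is feasible: B returns 0 and nothing in (0, R] is feasible
    rw [h0]
    by_contra hne
    have hApos : 0 < rA := lt_of_le_of_ne hA1 (by omega)
    rcases hA3 with h3 | h3
    · omega
    · rw [hisp] at h3
      obtain ⟨m, hmcl, _, hmf⟩ := hcand rA (by omega) h3
      have := hall m hmcl
      simp [hmf] at this
  · -- B returns the largest feasible candidate
    have hrBb := hclbound _ hmem
    rcases lt_trichotomy rA (candScan sp router cl) with hlt | heq | hgt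
    · exfalso
      have hno := hA4 _ hlt hrBb.2
      rw [hisp, hfeas] at hno
      exact absurd hno (by simp)
    · exact heq
    · exfalso
      -- rA is feasible (rA > rB ≥ 1 > 0) yet exceeds every feasible candidate
      rcases hA3 with h3 | h3
      · omega
      · rw [hisp] at h3
        obtain ⟨m, hmcl, hram, hmf⟩ := hcand rA (by omega) h3
        have := hall m hmcl (by omega)
        simp [hmf] at this
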